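-- pv_equiv track=rewrite | github.com/bloopgoop/projects | test/factorial.py | recurse
-- ===== SOURCE A (Python) =====
-- def recurse(text):
--     if text:
--         if text[0] > 'm':
--             return recurse(text[1:])
--         else:
--             return text[0] + recurse(text[1:])
--     else:
--         return ""
-- ===== SOURCE B (Python) =====
-- def recurse(text):
--     acc = ""
--     for ch in text:
--         if ch <= 'm':
--             acc = acc + ch
--     return acc
-- ===== Notes on version B (the rewrite author's own statement) =====
-- stated objective: faster
-- what changed: Replaced character-by-character recursion (which rebuilds the tail slice at every step) with a single explicit loop accumulating kept characters.
import Mathlib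
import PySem

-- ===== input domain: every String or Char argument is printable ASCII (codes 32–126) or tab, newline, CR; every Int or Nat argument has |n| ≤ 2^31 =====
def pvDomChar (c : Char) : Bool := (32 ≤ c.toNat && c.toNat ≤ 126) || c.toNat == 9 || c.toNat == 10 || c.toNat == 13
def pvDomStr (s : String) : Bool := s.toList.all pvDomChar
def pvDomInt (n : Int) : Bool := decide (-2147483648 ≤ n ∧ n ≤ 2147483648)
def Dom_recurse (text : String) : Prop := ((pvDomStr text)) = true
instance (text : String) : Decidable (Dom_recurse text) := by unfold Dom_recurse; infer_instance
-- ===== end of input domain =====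

-- B replaces A's tail-slicing recursion with one explicit accumulating loop (simpler, same return value).


-- ===== PORT A =====
-- A recurses on the string: if nonempty, drop text[0] when > 'm', else keep it, and recurse on text[1:].
def recurseChars : List Char → List Char
  | [] => []
  | c :: rest => if c > 'm' then recurseChars rest else c :: recurseChars rest

def recurse (text : String) : String := String.mk (recurseChars text.toList)

-- ===== PORT B =====
-- B iterates over the characters, appending each ch ≤ 'm' to an accumulator string.
def recurse_alt (text : String) : String :=
  String.mk (text.toList.foldl (fun acc ch => if ch ≤ 'm' then acc ++ [ch] else acc) [])

-- ===== PRECONDITION & SPEC =====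
def Spec_recurse (text : String) (out : String) : Prop := out = recurse_alt text
instance (text : String) (out : String) : Decidable (Spec_recurse text out) := by unfold Spec_recurse; infer_instance

-- ===== CLAIM (what is proved, stated in full; the proofs are below) =====
def Claim_equal_recurse : Prop := ∀ (text : String), Dom_recurse text → Spec_recurse text (recurse text)

-- ===== LEMMAS AND PROOFS =====
theorem foldl_keep_eq (l : List Char) (acc : List Char) :
    l.foldl (fun acc ch => if ch ≤ 'm' then acc ++ [ch] else acc) acc = acc ++ recurseChars l := by
  induction l generalizing acc with
  | nil => simp [recurseChars]
  | cons c rest ih =>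
    simp only [List.foldl, recurseChars]
    by_cases h : c ≤ 'm'
    · rw [if_pos h, if_neg (not_lt.mpr h), ih]; simp
    · rw [if_neg h, if_pos (lt_of_not_ge h), ih]

-- ===== VERDICT (by name: the statement is the Claim_ definition above) =====
theorem recurse_spec : Claim_equal_recurse := by
  intro text _
  unfold Spec_recurse recurse recurse_alt
  rw [foldl_keep_eq]
  simp
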